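-- pv_equiv track=rewrite | github.com/SaraPalaciosAndes/CyberCDA | app.py | fusionar_controles
-- ===== SOURCE A (Python) =====
-- def fusionar_controles(lista_jsons):
--     """
--     Recibe una lista de JSONs con la estructura de controles por dominio
--     y devuelve un único JSON fusionado.
--     """
--     resultado = {
--         "Infraestructura_y_Redes": [],
--         "Aplicativos_y_Datos": [],
--         "Gobierno_y_Cumplimiento": [],
--         "Personas": [],
--         "Proveedores": [],
--         "Fisicos": []
--     }
--
--     for j in lista_jsons:
--         for dominio, controles in j.items():
--             if dominio not in resultado:
--                 resultado[dominio] = []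
--             resultado[dominio].extend(controles)
--
--     return resultado
-- ===== SOURCE B (Python) =====
-- def fusionar_controles(lista_jsons):
--     """
--     Recibe una lista de JSONs con la estructura de controles por dominio
--     y devuelve un único JSON fusionado.
--     """
--     defaults = [
--         "Infraestructura_y_Redes",
--         "Aplicativos_y_Datos",
--         "Gobierno_y_Cumplimiento",
--         "Personas",
--         "Proveedores",
--         "Fisicos",
--     ]
--     keys = list(defaults)
--     seen = set(defaults)
--     for j in lista_jsons:
--         for dominio, _controles in j.items():
--             if dominio not in seen:
--                 seen.add(dominio)
--                 keys.append(dominio)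
--     return {k: [c for j in lista_jsons for c in j.get(k, [])] for k in keys}
-- ===== Notes on version B (the rewrite author's own statement) =====
-- stated objective: alternative
-- what changed: A scatters every (domain, controls) pair into a mutable bucket dict in one pass; B first computes the ordered key list (six defaults plus first occurrences of extra domains) and then builds the result as a dict comprehension that, per key, concatenates that key's entries across all inputs via a defaulting get.
import Mathlib
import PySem

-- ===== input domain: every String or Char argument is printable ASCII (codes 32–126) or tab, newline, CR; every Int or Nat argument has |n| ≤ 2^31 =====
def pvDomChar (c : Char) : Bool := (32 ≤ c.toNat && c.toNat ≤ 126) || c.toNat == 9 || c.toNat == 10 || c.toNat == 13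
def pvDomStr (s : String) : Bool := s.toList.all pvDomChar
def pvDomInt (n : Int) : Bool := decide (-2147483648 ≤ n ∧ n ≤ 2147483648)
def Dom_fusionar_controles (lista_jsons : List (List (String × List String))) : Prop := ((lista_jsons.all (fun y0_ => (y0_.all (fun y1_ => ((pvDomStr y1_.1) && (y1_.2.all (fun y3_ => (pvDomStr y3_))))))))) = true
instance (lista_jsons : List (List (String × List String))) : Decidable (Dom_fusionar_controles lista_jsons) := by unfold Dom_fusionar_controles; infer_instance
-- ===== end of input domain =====

-- B builds the ordered key list first and then concatenates each key's lists across all inputs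
-- (a per-key gather), instead of A's single scatter-into-buckets pass; objective: alternative.

-- ===== PORT A =====
-- body of A's inner loop: 'if dominio not in resultado: resultado[dominio] = []; resultado[dominio].extend(controles)'
def fcStepA (res : PySem.Dict String (List String)) (p : String × List String) : PySem.Dict String (List String) :=
  let res := if res.contains p.1 = false then res.insert p.1 [] else res
  res.modify p.1 [] (fun v => v ++ p.2)

-- 'resultado' starts as the literal dict of the six default domains
def fcResultado0 : PySem.Dict String (List String) := PySem.Dict.mk
  [("Infraestructura_y_Redes", []), ("Aplicativos_y_Datos", []), ("Gobierno_y_Cumplimiento", []),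
   ("Personas", []), ("Proveedores", []), ("Fisicos", [])]

def fusionar_controles (lista_jsons : List (List (String × List String))) : List (String × List String) :=
  (lista_jsons.foldl (fun res j => j.foldl fcStepA res) fcResultado0).items

-- ===== PORT B =====
-- body of B's key-discovery loop: 'if dominio not in seen: seen.add(dominio); keys.append(dominio)'
def fcStepB (st : List String × PySem.Set String) (p : String × List String) : List String × PySem.Set String :=
  if st.2.contains p.1 then st else (st.1 ++ [p.1], st.2.add p.1)

-- 'defaults': the six fixed domains, in order
def fcbDefaults : List String :=
  ["Infraestructura_y_Redes", "Aplicativos_y_Datos", "Gobierno_y_Cumplimiento",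
   "Personas", "Proveedores", "Fisicos"]

def fusionar_controles_alt (lista_jsons : List (List (String × List String))) : List (String × List String) :=
  (lista_jsons.foldl (fun st j => j.foldl fcStepB st) (fcbDefaults, PySem.Set.ofList fcbDefaults)).1.map
    (fun k => (k, lista_jsons.foldl (fun acc j => acc ++ PySem.Dict.getD (PySem.Dict.mk j) k []) []))

-- ===== PRECONDITION & SPEC =====
-- Pre_ excludes association lists in which some inner dict carries a duplicate key: such a list does
-- not represent a Python dict (dict keys are distinct), so neither program ever receives it.
def Pre_fusionar_controles (lista_jsons : List (List (String × List String))) : Prop :=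
  ∀ j ∈ lista_jsons, (j.map Prod.fst).Nodup

instance (lista_jsons : List (List (String × List String))) : Decidable (Pre_fusionar_controles lista_jsons) := by
  unfold Pre_fusionar_controles; infer_instance

def pvWitness_fusionar_controles : (List (List (String × List String))) :=
  [[("Personas", ["c1", "c2"]), ("Extra", ["c3"])], [("Extra", ["c4"])]]

def Spec_fusionar_controles (lista_jsons : List (List (String × List String))) (out : List (String × List String)) : Prop := out = fusionar_controles_alt lista_jsons
instance (lista_jsons : List (List (String × List String))) (out : List (String × List String)) : Decidable (Spec_fusionar_controles lista_jsons out) := by unfold Spec_fusionar_controles; infer_instance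

-- ===== CLAIM (what is proved, stated in full; the proofs are below) =====
def Claim_equal_fusionar_controles : Prop := ∀ (lista_jsons : List (List (String × List String))), Dom_fusionar_controles lista_jsons → Pre_fusionar_controles lista_jsons → Spec_fusionar_controles lista_jsons (fusionar_controles lista_jsons)

-- ===== LEMMAS AND PROOFS =====

-- keys of j that are new relative to ks, in order
def pvNewKeys (ks : List String) (j : List (String × List String)) : List String :=
  (j.map Prod.fst).filter (fun k => !ks.contains k)

-- ordered key accumulation across all input dicts
def pvKeyAcc : List String → List (List (String × List String)) → List String
  | ks, [] => ks
  | ks, j :: rest => pvKeyAcc (ks ++ pvNewKeys ks j) rest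

-- contains on a dict built by mapping keys to values
lemma pv_contains_mkmap (ks : List String) (f : String → List String) (k : String) :
    (PySem.Dict.mk (ks.map (fun x => (x, f x)))).contains k = ks.contains k := by
  rw [Bool.eq_iff_iff]
  simp [PySem.Dict.contains, List.any_eq_true]

lemma pv_getD_mkmap_mem (ks : List String) (f : String → List String) (k : String) :
    k ∈ ks → PySem.Dict.getD (PySem.Dict.mk (ks.map (fun x => (x, f x)))) k [] = f k := by
  induction ks with
  | nil => intro hk; cases hk
  | cons a t ih =>
    intro hk
    by_cases h : a = k
    · subst h
      simp [PySem.Dict.getD, PySem.Dict.get?, List.find?_cons_of_pos]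
    · have hb : ((a, f a).1 == k) = false := by simp [h]
      rcases List.mem_cons.mp hk with hk | hk
      · exact absurd hk.symm h
      · simpa [PySem.Dict.getD, PySem.Dict.get?, List.find?_cons_of_neg, hb] using ih hk

lemma pv_getD_mk_cons (p : String × List String) (rest : List (String × List String)) (k : String) :
    PySem.Dict.getD (PySem.Dict.mk (p :: rest)) k [] =
      if p.1 = k then p.2 else PySem.Dict.getD (PySem.Dict.mk rest) k [] := by
  by_cases h : p.1 = k
  · have hb : (p.1 == k) = true := by simp [h]
    simp [PySem.Dict.getD, PySem.Dict.get?, List.find?_cons_of_pos, h]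
  · have hb : (p.1 == k) = false := by simp [h]
    simp [PySem.Dict.getD, PySem.Dict.get?, List.find?_cons_of_neg, hb, h]

lemma pv_getD_mk_not_mem (j : List (String × List String)) (k : String) (hk : k ∉ j.map Prod.fst) :
    PySem.Dict.getD (PySem.Dict.mk j) k [] = [] := by
  induction j with
  | nil => simp [PySem.Dict.getD, PySem.Dict.get?]
  | cons p rest ih =>
    simp only [List.map_cons, List.mem_cons, not_or] at hk
    rw [pv_getD_mk_cons, if_neg (fun h => hk.1 h.symm)]
    exact ih hk.2

-- one A-step on a dict in mapped normal form
lemma pv_stepA_mem (ks : List String) (f : String → List String) (p : String × List String)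
    (hp : p.1 ∈ ks) :
    fcStepA (PySem.Dict.mk (ks.map (fun k => (k, f k)))) p =
      PySem.Dict.mk (ks.map (fun k => (k, if k = p.1 then f p.1 ++ p.2 else f k))) := by
  have hc : (PySem.Dict.mk (ks.map (fun k => (k, f k)))).contains p.1 = true := by
    rw [pv_contains_mkmap]; exact List.contains_iff_mem.mpr hp
  simp only [fcStepA, hc, Bool.true_eq_false, if_false, PySem.Dict.modify,
    pv_getD_mkmap_mem ks f p.1 hp, PySem.Dict.insert, if_true]
  congr 1
  simp only [List.map_map]
  apply List.map_congr_left
  intro k _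
  by_cases h : k = p.1 <;> simp [Function.comp, h]

lemma pv_stepA_not_mem (ks : List String) (f : String → List String) (p : String × List String)
    (hp : p.1 ∉ ks) :
    fcStepA (PySem.Dict.mk (ks.map (fun k => (k, f k)))) p =
      PySem.Dict.mk ((ks ++ [p.1]).map (fun k => (k, if k = p.1 then p.2 else f k))) := by
  have hc : (PySem.Dict.mk (ks.map (fun k => (k, f k)))).contains p.1 = false := by
    rw [pv_contains_mkmap]; simp [hp]
  have hfind : (ks.map (fun k => (k, f k))).find? (fun q => q.1 == p.1) = none := by
    simp only [List.find?_eq_none]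
    intro q hq
    simp only [List.mem_map] at hq
    obtain ⟨a, ha, rfl⟩ := hq
    simp
    intro h; exact hp (h ▸ ha)
  have hc2 : (PySem.Dict.mk (ks.map (fun k => (k, f k)) ++ [(p.1, ([] : List String))])).contains p.1 = true := by
    simp [PySem.Dict.contains]
  have hg : PySem.Dict.getD (PySem.Dict.mk (ks.map (fun k => (k, f k)) ++ [(p.1, ([] : List String))])) p.1 [] = [] := by
    simp [PySem.Dict.getD, PySem.Dict.get?, List.find?_append, hfind, List.find?]
  simp only [fcStepA, if_true, PySem.Dict.insert, hc, Bool.false_eq_true, if_false,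
    PySem.Dict.modify, hg, hc2]
  congr 1
  simp only [List.map_append, List.map_map, List.map_cons, List.map_nil, List.nil_append]
  congr 1
  · apply List.map_congr_left
    intro k hk
    have hne : k ≠ p.1 := fun h => hp (h ▸ hk)
    simp [Function.comp, hne]
  · simp

-- A's inner loop over one input dict, on a dict in mapped normal form
lemma pv_foldA_inner (j : List (String × List String)) :
    ∀ (ks : List String) (f : String → List String), ks.Nodup → (j.map Prod.fst).Nodup →
    j.foldl fcStepA (PySem.Dict.mk (ks.map (fun k => (k, f k)))) =
    PySem.Dict.mk ((ks ++ pvNewKeys ks j).map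
      (fun k => (k, (if ks.contains k then f k else []) ++ PySem.Dict.getD (PySem.Dict.mk j) k []))) := by
  induction j with
  | nil =>
    intro ks f hks _
    simp only [List.foldl_nil, pvNewKeys, List.map_nil, List.filter_nil, List.append_nil]
    congr 1
    apply List.map_congr_left
    intro k hk
    simp [hk, PySem.Dict.getD, PySem.Dict.get?]
  | cons p rest ih =>
    intro ks f hks hj
    simp only [List.map_cons, List.nodup_cons] at hj
    obtain ⟨hp1, hrest⟩ := hj
    rw [List.foldl_cons]
    by_cases hp : p.1 ∈ ks
    · rw [pv_stepA_mem ks f p hp,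
        ih ks (fun k => if k = p.1 then f p.1 ++ p.2 else f k) hks hrest]
      have hnk : pvNewKeys ks (p :: rest) = pvNewKeys ks rest := by
        simp [pvNewKeys, hp]
      rw [hnk]
      congr 1
      apply List.map_congr_left
      intro k _
      by_cases h : k = p.1
      · subst h
        simp [hp, pv_getD_mk_cons, pv_getD_mk_not_mem rest p.1 hp1]
      · have hne : ¬ p.1 = k := fun hh => h hh.symm
        simp [pv_getD_mk_cons, h, hne]
    · rw [pv_stepA_not_mem ks f p hp,
        ih (ks ++ [p.1]) (fun k => if k = p.1 then p.2 else f k)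
          (List.Nodup.append hks (List.nodup_singleton _)
            (fun a ha hb => hp ((List.mem_singleton.mp hb) ▸ ha))) hrest]
      have hnk1 : pvNewKeys (ks ++ [p.1]) rest = pvNewKeys ks rest := by
        apply List.filter_congr
        intro x hx
        have hne : x ≠ p.1 := fun h => hp1 (h ▸ hx)
        simp [hne]
      have hnk2 : pvNewKeys ks (p :: rest) = p.1 :: pvNewKeys ks rest := by
        simp [pvNewKeys, hp]
      rw [hnk1, hnk2]
      have hkeys : (ks ++ [p.1]) ++ pvNewKeys ks rest = ks ++ (p.1 :: pvNewKeys ks rest) := by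
        simp
      rw [hkeys]
      congr 1
      apply List.map_congr_left
      intro k _
      by_cases h : k = p.1
      · subst h
        simp [hp, pv_getD_mk_cons, pv_getD_mk_not_mem rest p.1 hp1]
      · have hne : ¬ p.1 = k := fun hh => h hh.symm
        simp [h, hne, pv_getD_mk_cons]

-- A's outer loop: the whole accumulation in per-key gathered form
lemma pv_foldA_outer (lista : List (List (String × List String))) :
    ∀ (ks : List String) (f : String → List String), ks.Nodup →
    (∀ j ∈ lista, (j.map Prod.fst).Nodup) →
    lista.foldl (fun res j => j.foldl fcStepA res) (PySem.Dict.mk (ks.map (fun k => (k, f k)))) =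
    PySem.Dict.mk ((pvKeyAcc ks lista).map
      (fun k => (k, (if ks.contains k then f k else []) ++
        lista.flatMap (fun j => PySem.Dict.getD (PySem.Dict.mk j) k [])))) := by
  induction lista with
  | nil =>
    intro ks f hks _
    simp only [List.foldl_nil, pvKeyAcc, List.flatMap_nil, List.append_nil]
    congr 1
    apply List.map_congr_left
    intro k hk
    simp [hk]
  | cons j rest ih =>
    intro ks f hks hall
    rw [List.foldl_cons, pv_foldA_inner j ks f hks (hall j (by simp)),
      ih (ks ++ pvNewKeys ks j)
        (fun k => (if ks.contains k then f k else []) ++ PySem.Dict.getD (PySem.Dict.mk j) k [])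
        (by
          refine List.Nodup.append hks (List.Nodup.filter _ (hall j (by simp))) ?_
          intro x hx hx2
          have h2 : x ∉ ks := (by simpa [pvNewKeys] using hx2 : (∃ v, (x, v) ∈ j) ∧ x ∉ ks).2
          exact h2 hx)
        (fun j2 hj2 => hall j2 (by simp [hj2]))]
    simp only [pvKeyAcc]
    congr 1
    apply List.map_congr_left
    intro k _
    by_cases h1 : k ∈ ks
    · simp [h1, List.flatMap_cons, List.append_assoc]
    · by_cases h2 : k ∈ j.map Prod.fst
      · have hmem : k ∈ pvNewKeys ks j := by
          simp [pvNewKeys, List.mem_filter, h2, h1]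
        simp [hmem, h1, List.flatMap_cons]
      · have hnm : k ∉ pvNewKeys ks j := by
          simp [pvNewKeys, List.mem_filter, h2]
        simp [hnm, h1, List.flatMap_cons, pv_getD_mk_not_mem j k h2]

-- B's key-discovery loop over one input dict
lemma pv_foldB_inner (j : List (String × List String)) :
    ∀ (ks : List String) (s : PySem.Set String), (∀ x, x ∈ s ↔ x ∈ ks) →
    (j.map Prod.fst).Nodup →
    j.foldl fcStepB (ks, s) = (ks ++ pvNewKeys ks j, s ++ pvNewKeys ks j) := by
  induction j with
  | nil => intro ks s hinv _; simp [pvNewKeys]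
  | cons p rest ih =>
    intro ks s hinv hj
    simp only [List.map_cons, List.nodup_cons] at hj
    obtain ⟨hp1, hrest⟩ := hj
    rw [List.foldl_cons]
    by_cases hp : p.1 ∈ ks
    · have hm : p.1 ∈ s := (hinv p.1).mpr hp
      have hc : PySem.Set.contains s p.1 = true := List.contains_iff_mem.mpr hm
      have hnk : pvNewKeys ks (p :: rest) = pvNewKeys ks rest := by
        simp [pvNewKeys, hp]
      rw [hnk]
      have hstep : fcStepB (ks, s) p = (ks, s) := by
        simp [fcStepB, hm]
      rw [hstep]
      exact ih ks s hinv hrest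
    · have hm : p.1 ∉ s := fun h => hp ((hinv p.1).mp h)
      have hc : PySem.Set.contains s p.1 = false := by
        rw [Bool.eq_false_iff]
        intro h
        exact hm (List.contains_iff_mem.mp h)
      have hstep : fcStepB (ks, s) p = (ks ++ [p.1], s ++ [p.1]) := by
        simp [fcStepB, PySem.Set.add, hm]
      have hinv2 : ∀ x, x ∈ s ++ [p.1] ↔ x ∈ ks ++ [p.1] := by
        intro x
        simp [hinv x]
      have hnk1 : pvNewKeys (ks ++ [p.1]) rest = pvNewKeys ks rest := by
        apply List.filter_congr
        intro x hx
        have hne : x ≠ p.1 := fun h => hp1 (h ▸ hx)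
        simp [hne]
      have hnk2 : pvNewKeys ks (p :: rest) = p.1 :: pvNewKeys ks rest := by
        simp [pvNewKeys, hp]
      rw [hstep, ih (ks ++ [p.1]) (s ++ [p.1]) hinv2 hrest, hnk1, hnk2]
      simp

-- B's key-discovery loop over all inputs
lemma pv_foldB_outer (lista : List (List (String × List String))) :
    ∀ (ks : List String) (s : PySem.Set String), (∀ x, x ∈ s ↔ x ∈ ks) →
    (∀ j ∈ lista, (j.map Prod.fst).Nodup) →
    (lista.foldl (fun st j => j.foldl fcStepB st) (ks, s)).1 = pvKeyAcc ks lista := by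
  induction lista with
  | nil => intro ks s _ _; simp [pvKeyAcc]
  | cons j rest ih =>
    intro ks s hinv hall
    rw [List.foldl_cons, pv_foldB_inner j ks s hinv (hall j (by simp))]
    rw [pvKeyAcc]
    apply ih
    · intro x
      simp [hinv x]
    · exact fun j2 hj2 => hall j2 (by simp [hj2])

theorem fusionar_controles_spec : Claim_equal_fusionar_controles := by
  unfold Claim_equal_fusionar_controles
  intro lista _ hpre
  unfold Spec_fusionar_controles
  unfold fusionar_controles fusionar_controles_alt
  have hpre' : ∀ j ∈ lista, (j.map Prod.fst).Nodup := hpre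
  have hdef : fcbDefaults.Nodup := by decide
  have hA0 : fcResultado0 = PySem.Dict.mk (fcbDefaults.map (fun k => (k, (fun _ => ([] : List String)) k))) := rfl
  rw [hA0, pv_foldA_outer lista _ _ hdef hpre']
  have hofl : PySem.Set.ofList fcbDefaults = fcbDefaults :=
    PySem.Set.ofList_eq_self_of_nodup fcbDefaults hdef
  rw [hofl, pv_foldB_outer lista _ _ (fun x => Iff.rfl) hpre']
  apply List.map_congr_left
  intro k _
  rw [PySem.List.foldl_append_eq_flatMap]
  simp
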